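-- pv_equiv track=rewrite | github.com/ripclass/trdrhub.com | apps/api/app/services/extraction_core/review_metadata.py | _canonicalize_reason_codes
-- ===== SOURCE A (Python) =====
-- from typing import Any, Dict, Iterable, List, Optional, Sequence, Tuple
--
-- _CANONICAL_REASON_CODES = {
--     "OCR_UNSUPPORTED_FORMAT",
--     "OCR_TIMEOUT",
--     "OCR_AUTH_ERROR",
--     "OCR_EMPTY_RESULT",
--     "FIELD_NOT_FOUND",
--     "FORMAT_INVALID",
--     "EVIDENCE_MISSING",
--     "LOW_CONFIDENCE_CRITICAL",
--     "CROSS_FIELD_CONFLICT",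
-- }
--
-- def _normalize_text(value: Any) -> str:
--     if value in (None, "", [], {}):
--         return ""
--     return str(value).strip()
--
-- def _canonicalize_reason_codes(raw_codes: Iterable[Any]) -> List[str]:
--     canonical: List[str] = []
--     for raw_code in raw_codes:
--         text = _normalize_text(raw_code)
--         if not text:
--             continue
--         upper = text.upper()
--         if upper in _CANONICAL_REASON_CODES:
--             canonical.append(upper)
--             continue
--
--         lowered = text.lower()
--         if any(token in lowered for token in ("unsupported", "invalid mime", "content type", "content-type")):
--             canonical.append("OCR_UNSUPPORTED_FORMAT")
--         elif "timeout" in lowered or "timed out" in lowered or "deadline" in lowered: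
--             canonical.append("OCR_TIMEOUT")
--         elif any(token in lowered for token in ("unauthor", "forbidden", "credential", "access denied", "permission", "api key", "auth")):
--             canonical.append("OCR_AUTH_ERROR")
--         elif any(token in lowered for token in ("empty_all_stages", "parser_empty_output", "empty_output", "empty result", "empty_result", "no text", "no output", "provider_unavailable")):
--             canonical.append("OCR_EMPTY_RESULT")
--         elif any(token in lowered for token in ("evidence_missing", "evidence missing")):
--             canonical.append("EVIDENCE_MISSING")
--         elif any(token in lowered for token in ("low_confidence", "low confidence")):
--             canonical.append("LOW_CONFIDENCE_CRITICAL")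
--         elif any(token in lowered for token in ("net_gt_gross", "amount_currency", "cross_field_conflict", "conflict")):
--             canonical.append("CROSS_FIELD_CONFLICT")
--         elif any(
--             token in lowered
--             for token in (
--                 "parse_failed",
--                 "format_invalid",
--                 "date_parse_invalid",
--                 "bin_length_invalid",
--                 "tin_length_invalid",
--                 "weight_unit_unknown",
--                 "weight_number_missing",
--                 "voyage_format_invalid",
--                 "issuer_empty",
--                 "invalid",
--             )
--         ):
--             canonical.append("FORMAT_INVALID")
--         elif any(token in lowered for token in ("field_not_found", "missing")):
--             canonical.append("FIELD_NOT_FOUND")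
--
--     return sorted(dict.fromkeys(code for code in canonical if code))
-- ===== SOURCE B (Python) =====
-- # B: invert the loops — enumerate the sorted canonical codes and keep each one that some
-- # preprocessed item resolves to; priority is expressed as "no earlier token group matches"
-- # instead of a first-match cascade, so no dedup/sort of results is needed.
-- from typing import Any, Iterable, List
--
-- _TOKENS = {
--     "OCR_UNSUPPORTED_FORMAT": ("unsupported", "invalid mime", "content type", "content-type"),
--     "OCR_TIMEOUT": ("timeout", "timed out", "deadline"),
--     "OCR_AUTH_ERROR": ("unauthor", "forbidden", "credential", "access denied", "permission", "api key", "auth"),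
--     "OCR_EMPTY_RESULT": ("empty_all_stages", "parser_empty_output", "empty_output", "empty result", "empty_result", "no text", "no output", "provider_unavailable"),
--     "EVIDENCE_MISSING": ("evidence_missing", "evidence missing"),
--     "LOW_CONFIDENCE_CRITICAL": ("low_confidence", "low confidence"),
--     "CROSS_FIELD_CONFLICT": ("net_gt_gross", "amount_currency", "cross_field_conflict", "conflict"),
--     "FORMAT_INVALID": ("parse_failed", "format_invalid", "date_parse_invalid", "bin_length_invalid", "tin_length_invalid",
--                        "weight_unit_unknown", "weight_number_missing", "voyage_format_invalid", "issuer_empty", "invalid"),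
--     "FIELD_NOT_FOUND": ("field_not_found", "missing"),
-- }
-- _PRIORITY = list(_TOKENS)  # cascade priority = insertion order
--
-- def _hits(lowered: str, code: str) -> bool:
--     return any(t in lowered for t in _TOKENS.get(code, ()))
--
-- def _resolves_to(upper: str, lowered: str, code: str) -> bool:
--     if upper in _TOKENS:
--         return upper == code
--     if not _hits(lowered, code):
--         return False
--     rank = _PRIORITY.index(code)
--     return not any(_hits(lowered, earlier) for earlier in _PRIORITY[:rank])
--
-- def _canonicalize_reason_codes(raw_codes: Iterable[Any]) -> List[str]:
--     items = []
--     for raw_code in raw_codes: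
--         if raw_code in (None, "", [], {}):
--             continue
--         text = str(raw_code).strip()
--         if text:
--             items.append((text.upper(), text.lower()))
--     return [code for code in sorted(_TOKENS)
--             if any(_resolves_to(upper, lowered, code) for upper, lowered in items)]
-- ===== Notes on version B (the rewrite author's own statement) =====
-- stated objective: alternative
-- what changed: B inverts the loop structure: instead of classifying each item through the if/elif cascade, collecting, dedup-ing and sorting, it preprocesses the items once and then filters the sorted list of the nine canonical codes on 'some item resolves to this code', expressing cascade priority as 'this token group hits and no earlier group hits', so no dedup or result sort is performed.
import Mathlib
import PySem

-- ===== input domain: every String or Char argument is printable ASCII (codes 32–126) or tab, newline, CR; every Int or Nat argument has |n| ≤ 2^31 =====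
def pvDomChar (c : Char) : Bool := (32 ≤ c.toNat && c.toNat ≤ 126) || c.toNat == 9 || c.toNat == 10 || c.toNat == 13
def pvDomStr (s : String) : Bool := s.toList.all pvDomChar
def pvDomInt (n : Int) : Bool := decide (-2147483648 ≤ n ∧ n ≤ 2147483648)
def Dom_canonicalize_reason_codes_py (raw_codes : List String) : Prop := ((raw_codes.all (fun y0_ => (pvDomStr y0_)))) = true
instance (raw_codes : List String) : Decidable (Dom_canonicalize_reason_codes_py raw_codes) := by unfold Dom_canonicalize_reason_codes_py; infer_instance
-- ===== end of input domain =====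

set_option maxHeartbeats 2000000


-- B inverts the loops: it preprocesses the items once, then builds the result by filtering the
-- sorted canonical codes on "some item resolves to this code" (priority = no earlier token
-- group matches), so A's dedup + final sort disappear (alternative decomposition, same cost).

-- ===== PORT A =====
-- Python set _CANONICAL_REASON_CODES: used only for membership, so a list with 'contains' is exact.
def pvCanonCodes : List String :=
  ["OCR_UNSUPPORTED_FORMAT", "OCR_TIMEOUT", "OCR_AUTH_ERROR", "OCR_EMPTY_RESULT",
   "FIELD_NOT_FOUND", "FORMAT_INVALID", "EVIDENCE_MISSING", "LOW_CONFIDENCE_CRITICAL",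
   "CROSS_FIELD_CONFLICT"]

-- _normalize_text specialised to str input: '' stays '', otherwise str(value).strip()
def canonicalize_reason_codes_py (raw_codes : List String) : List String :=
  let canonical := raw_codes.foldl (fun canonical raw_code =>
    let text := if raw_code = "" then "" else PySem.Str.strip raw_code
    if text = "" then canonical
    else
      let upper := PySem.Str.upper text
      if pvCanonCodes.contains upper then canonical ++ [upper]
      else
        let lowered := PySem.Str.lower text
        if ["unsupported", "invalid mime", "content type", "content-type"].any (fun t => PySem.Str.isIn t lowered) then
          canonical ++ ["OCR_UNSUPPORTED_FORMAT"]
        else if PySem.Str.isIn "timeout" lowered || PySem.Str.isIn "timed out" lowered || PySem.Str.isIn "deadline" lowered then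
          canonical ++ ["OCR_TIMEOUT"]
        else if ["unauthor", "forbidden", "credential", "access denied", "permission", "api key", "auth"].any (fun t => PySem.Str.isIn t lowered) then
          canonical ++ ["OCR_AUTH_ERROR"]
        else if ["empty_all_stages", "parser_empty_output", "empty_output", "empty result", "empty_result", "no text", "no output", "provider_unavailable"].any (fun t => PySem.Str.isIn t lowered) then
          canonical ++ ["OCR_EMPTY_RESULT"]
        else if ["evidence_missing", "evidence missing"].any (fun t => PySem.Str.isIn t lowered) then
          canonical ++ ["EVIDENCE_MISSING"]
        else if ["low_confidence", "low confidence"].any (fun t => PySem.Str.isIn t lowered) then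
          canonical ++ ["LOW_CONFIDENCE_CRITICAL"]
        else if ["net_gt_gross", "amount_currency", "cross_field_conflict", "conflict"].any (fun t => PySem.Str.isIn t lowered) then
          canonical ++ ["CROSS_FIELD_CONFLICT"]
        else if ["parse_failed", "format_invalid", "date_parse_invalid", "bin_length_invalid", "tin_length_invalid", "weight_unit_unknown", "weight_number_missing", "voyage_format_invalid", "issuer_empty", "invalid"].any (fun t => PySem.Str.isIn t lowered) then
          canonical ++ ["FORMAT_INVALID"]
        else if ["field_not_found", "missing"].any (fun t => PySem.Str.isIn t lowered) then
          canonical ++ ["FIELD_NOT_FOUND"]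
        else canonical) []
  PySem.List.sorted (PySem.List.dedup (canonical.filter (fun code => !(code == "")))) (fun x => x) false

-- ===== PORT B =====
-- the module dict _TOKENS: association list in insertion (= priority) order
def pvTokens : List (String × List String) :=
  [("OCR_UNSUPPORTED_FORMAT", ["unsupported", "invalid mime", "content type", "content-type"]),
   ("OCR_TIMEOUT", ["timeout", "timed out", "deadline"]),
   ("OCR_AUTH_ERROR", ["unauthor", "forbidden", "credential", "access denied", "permission", "api key", "auth"]),
   ("OCR_EMPTY_RESULT", ["empty_all_stages", "parser_empty_output", "empty_output", "empty result", "empty_result", "no text", "no output", "provider_unavailable"]),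
   ("EVIDENCE_MISSING", ["evidence_missing", "evidence missing"]),
   ("LOW_CONFIDENCE_CRITICAL", ["low_confidence", "low confidence"]),
   ("CROSS_FIELD_CONFLICT", ["net_gt_gross", "amount_currency", "cross_field_conflict", "conflict"]),
   ("FORMAT_INVALID", ["parse_failed", "format_invalid", "date_parse_invalid", "bin_length_invalid", "tin_length_invalid", "weight_unit_unknown", "weight_number_missing", "voyage_format_invalid", "issuer_empty", "invalid"]),
   ("FIELD_NOT_FOUND", ["field_not_found", "missing"])]

-- _PRIORITY = list(_TOKENS): the keys in insertion order
def pvPriority : List String := pvTokens.map Prod.fst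

-- _hits: any(t in lowered for t in _TOKENS.get(code, ()))
def pvHits (lowered code : String) : Bool :=
  ((PySem.Dict.mk pvTokens).getD code []).any (fun t => PySem.Str.isIn t lowered)

-- _resolves_to: exact match, else this group hits and no earlier group hits
def pvResolvesTo (upper lowered code : String) : Bool :=
  if pvPriority.contains upper then upper == code
  else if !pvHits lowered code then false
  else
    let rank := (PySem.List.index? pvPriority code).getD 0
    !((PySem.List.slice pvPriority none (some (rank : Int))).any (fun earlier => pvHits lowered earlier))

def canonicalize_reason_codes_py_alt (raw_codes : List String) : List String :=
  let items := raw_codes.foldl (fun items raw_code =>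
    if raw_code = "" then items
    else
      let text := PySem.Str.strip raw_code
      if text = "" then items
      else items ++ [(PySem.Str.upper text, PySem.Str.lower text)]) ([] : List (String × String))
  (PySem.List.sorted pvPriority (fun x => x) false).filter
    (fun code => items.any (fun p => pvResolvesTo p.1 p.2 code))

-- ===== PRECONDITION & SPEC =====
def Spec_canonicalize_reason_codes_py (raw_codes : List String) (out : List String) : Prop := out = canonicalize_reason_codes_py_alt raw_codes
instance (raw_codes : List String) (out : List String) : Decidable (Spec_canonicalize_reason_codes_py raw_codes out) := by unfold Spec_canonicalize_reason_codes_py; infer_instance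

-- ===== CLAIM (what is proved, stated in full; the proofs are below) =====
def Claim_equal_canonicalize_reason_codes_py : Prop := ∀ (raw_codes : List String), Dom_canonicalize_reason_codes_py raw_codes → Spec_canonicalize_reason_codes_py raw_codes (canonicalize_reason_codes_py raw_codes)

-- ===== LEMMAS AND PROOFS =====

-- proof-side abbreviations: the i-th token group and "some token of ts occurs in l"
def pvT (i : Nat) : List String := (pvTokens.getD i ("", [])).2
def pvG (ts : List String) (l : String) : Bool := ts.any (fun t => PySem.Str.isIn t l)

-- item preprocessing shared by the two readings
def pvItem (r : String) : Option (String × String) :=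
  if r = "" then none
  else
    let t := PySem.Str.strip r
    if t = "" then none else some (PySem.Str.upper t, PySem.Str.lower t)

-- A's cascade as a first-match search over pvTokens
def pvFirstMatch (lowered : String) : List (String × List String) → Option String
  | [] => none
  | (code, tokens) :: rest =>
      if tokens.any (fun t => PySem.Str.isIn t lowered) then some code
      else pvFirstMatch lowered rest

def pvClassify2 (u l : String) : Option String :=
  if pvCanonCodes.contains u then some u else pvFirstMatch l pvTokens

-- B's non-exact test, named so it can be evaluated per key
def pvNE (lowered code : String) : Bool :=
  if !pvHits lowered code then false
  else
    let rank := (PySem.List.index? pvPriority code).getD 0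
    !((PySem.List.slice pvPriority none (some (rank : Int))).any (fun earlier => pvHits lowered earlier))

theorem pv_contains_eq (s : String) : pvCanonCodes.contains s = pvPriority.contains s := by
  simp only [pvCanonCodes, pvPriority, pvTokens, List.map, List.contains_eq_mem, List.mem_cons,
    List.not_mem_nil, or_false, decide_eq_decide]
  tauto

theorem pv_step_eq (canonical : List String) (raw_code : String) :
    (let text := if raw_code = "" then "" else PySem.Str.strip raw_code
     if text = "" then canonical
     else
       let upper := PySem.Str.upper text
       if pvCanonCodes.contains upper then canonical ++ [upper]
       else
         let lowered := PySem.Str.lower text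
         if ["unsupported", "invalid mime", "content type", "content-type"].any (fun t => PySem.Str.isIn t lowered) then
           canonical ++ ["OCR_UNSUPPORTED_FORMAT"]
         else if PySem.Str.isIn "timeout" lowered || PySem.Str.isIn "timed out" lowered || PySem.Str.isIn "deadline" lowered then
           canonical ++ ["OCR_TIMEOUT"]
         else if ["unauthor", "forbidden", "credential", "access denied", "permission", "api key", "auth"].any (fun t => PySem.Str.isIn t lowered) then
           canonical ++ ["OCR_AUTH_ERROR"]
         else if ["empty_all_stages", "parser_empty_output", "empty_output", "empty result", "empty_result", "no text", "no output", "provider_unavailable"].any (fun t => PySem.Str.isIn t lowered) then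
           canonical ++ ["OCR_EMPTY_RESULT"]
         else if ["evidence_missing", "evidence missing"].any (fun t => PySem.Str.isIn t lowered) then
           canonical ++ ["EVIDENCE_MISSING"]
         else if ["low_confidence", "low confidence"].any (fun t => PySem.Str.isIn t lowered) then
           canonical ++ ["LOW_CONFIDENCE_CRITICAL"]
         else if ["net_gt_gross", "amount_currency", "cross_field_conflict", "conflict"].any (fun t => PySem.Str.isIn t lowered) then
           canonical ++ ["CROSS_FIELD_CONFLICT"]
         else if ["parse_failed", "format_invalid", "date_parse_invalid", "bin_length_invalid", "tin_length_invalid", "weight_unit_unknown", "weight_number_missing", "voyage_format_invalid", "issuer_empty", "invalid"].any (fun t => PySem.Str.isIn t lowered) then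
           canonical ++ ["FORMAT_INVALID"]
         else if ["field_not_found", "missing"].any (fun t => PySem.Str.isIn t lowered) then
           canonical ++ ["FIELD_NOT_FOUND"]
         else canonical)
    = canonical ++ ((pvItem raw_code).bind (fun p => pvClassify2 p.1 p.2)).toList := by
  by_cases h0 : raw_code = ""
  · simp [pvItem, h0]
  · simp only [pvItem, if_neg h0]
    by_cases h1 : PySem.Str.strip raw_code = ""
    · simp [h1]
    · simp only [if_neg h1, Option.bind_some]
      simp only [pvClassify2]
      by_cases h2 : pvCanonCodes.contains (PySem.Str.upper (PySem.Str.strip raw_code)) = true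
      · rw [if_pos h2, if_pos h2]; rfl
      · rw [if_neg h2, if_neg h2]
        simp only [pvFirstMatch, pvTokens, List.any_cons, List.any_nil, Bool.or_false, Bool.or_assoc]
        split_ifs <;> first | rfl | exact (List.append_nil canonical).symm

theorem pv_firstMatch_mem (lowered c : String) :
    ∀ rules : List (String × List String), pvFirstMatch lowered rules = some c →
      c ∈ rules.map Prod.fst := by
  intro rules
  induction rules with
  | nil => intro h; simp [pvFirstMatch] at h
  | cons p rest ih =>
      intro h
      obtain ⟨code, tokens⟩ := p
      rw [pvFirstMatch] at h
      split_ifs at h with ht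
      · cases h; simp
      · simpa using Or.inr (ih h)

theorem pv_classify2_mem (u l c : String) (h : pvClassify2 u l = some c) : c ∈ pvPriority := by
  simp only [pvClassify2] at h
  split_ifs at h with h0
  · cases h
    rw [pv_contains_eq, List.contains_eq_mem, decide_eq_true_iff] at h0
    exact h0
  · exact pv_firstMatch_mem l c pvTokens h

theorem pv_classify2_ne_empty (u l c : String) (h : pvClassify2 u l = some c) : c ≠ "" := by
  have := pv_classify2_mem u l c h
  simp only [pvPriority, pvTokens, List.map, List.mem_cons, List.not_mem_nil, or_false] at this
  rcases this with h'|h'|h'|h'|h'|h'|h'|h'|h' <;> simp [h']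

-- the first-match cascade, written out once with the groups abstracted
theorem pv_fm_show (l : String) : pvFirstMatch l pvTokens =
    (if pvG (pvT 0) l then some "OCR_UNSUPPORTED_FORMAT"
     else if pvG (pvT 1) l then some "OCR_TIMEOUT"
     else if pvG (pvT 2) l then some "OCR_AUTH_ERROR"
     else if pvG (pvT 3) l then some "OCR_EMPTY_RESULT"
     else if pvG (pvT 4) l then some "EVIDENCE_MISSING"
     else if pvG (pvT 5) l then some "LOW_CONFIDENCE_CRITICAL"
     else if pvG (pvT 6) l then some "CROSS_FIELD_CONFLICT"
     else if pvG (pvT 7) l then some "FORMAT_INVALID"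
     else if pvG (pvT 8) l then some "FIELD_NOT_FOUND"
     else none) := rfl

theorem pv_ne_key0 (l : String) : pvNE l "OCR_UNSUPPORTED_FORMAT" =
    (if !(pvG (pvT 0) l) then false else !false) := rfl
theorem pv_ne_key1 (l : String) : pvNE l "OCR_TIMEOUT" =
    (if !(pvG (pvT 1) l) then false else !(pvG (pvT 0) l || false)) := rfl
theorem pv_ne_key2 (l : String) : pvNE l "OCR_AUTH_ERROR" =
    (if !(pvG (pvT 2) l) then false else !(pvG (pvT 0) l || (pvG (pvT 1) l || false))) := rfl
theorem pv_ne_key3 (l : String) : pvNE l "OCR_EMPTY_RESULT" =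
    (if !(pvG (pvT 3) l) then false
     else !(pvG (pvT 0) l || (pvG (pvT 1) l || (pvG (pvT 2) l || false)))) := rfl
theorem pv_ne_key4 (l : String) : pvNE l "EVIDENCE_MISSING" =
    (if !(pvG (pvT 4) l) then false
     else !(pvG (pvT 0) l || (pvG (pvT 1) l || (pvG (pvT 2) l || (pvG (pvT 3) l || false))))) := rfl
theorem pv_ne_key5 (l : String) : pvNE l "LOW_CONFIDENCE_CRITICAL" =
    (if !(pvG (pvT 5) l) then false
     else !(pvG (pvT 0) l || (pvG (pvT 1) l || (pvG (pvT 2) l || (pvG (pvT 3) l || (pvG (pvT 4) l || false)))))) := rfl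
theorem pv_ne_key6 (l : String) : pvNE l "CROSS_FIELD_CONFLICT" =
    (if !(pvG (pvT 6) l) then false
     else !(pvG (pvT 0) l || (pvG (pvT 1) l || (pvG (pvT 2) l || (pvG (pvT 3) l || (pvG (pvT 4) l || (pvG (pvT 5) l || false))))))) := rfl
theorem pv_ne_key7 (l : String) : pvNE l "FORMAT_INVALID" =
    (if !(pvG (pvT 7) l) then false
     else !(pvG (pvT 0) l || (pvG (pvT 1) l || (pvG (pvT 2) l || (pvG (pvT 3) l || (pvG (pvT 4) l || (pvG (pvT 5) l || (pvG (pvT 6) l || false)))))))) := rfl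
theorem pv_ne_key8 (l : String) : pvNE l "FIELD_NOT_FOUND" =
    (if !(pvG (pvT 8) l) then false
     else !(pvG (pvT 0) l || (pvG (pvT 1) l || (pvG (pvT 2) l || (pvG (pvT 3) l || (pvG (pvT 4) l || (pvG (pvT 5) l || (pvG (pvT 6) l || (pvG (pvT 7) l || false))))))))) := rfl

-- the heart: B's non-exact predicate picks exactly the first-match code
theorem pv_ne_iff (l c : String) :
    (pvNE l c = true) ↔ pvFirstMatch l pvTokens = some c := by
  by_cases hc : c ∈ pvPriority
  · simp only [pvPriority, pvTokens, List.map, List.mem_cons, List.not_mem_nil, or_false] at hc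
    rcases hc with h'|h'|h'|h'|h'|h'|h'|h'|h' <;> subst h' <;>
      rw [pv_fm_show] <;>
      first
        | rw [pv_ne_key0] | rw [pv_ne_key1] | rw [pv_ne_key2] | rw [pv_ne_key3]
        | rw [pv_ne_key4] | rw [pv_ne_key5] | rw [pv_ne_key6] | rw [pv_ne_key7]
        | rw [pv_ne_key8]
    all_goals
      generalize pvG (pvT 0) l = b0
      generalize pvG (pvT 1) l = b1
      generalize pvG (pvT 2) l = b2
      generalize pvG (pvT 3) l = b3
      generalize pvG (pvT 4) l = b4
      generalize pvG (pvT 5) l = b5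
      generalize pvG (pvT 6) l = b6
      generalize pvG (pvT 7) l = b7
      generalize pvG (pvT 8) l = b8
      revert b0 b1 b2 b3 b4 b5 b6 b7 b8
      decide
  · have hhits : pvHits l c = false := by
      simp only [pvPriority, pvTokens, List.map, List.mem_cons, List.not_mem_nil, or_false,
        not_or] at hc
      obtain ⟨h1, h2, h3, h4, h5, h6, h7, h8, h9⟩ := hc
      have hget : (PySem.Dict.mk pvTokens).getD c ([] : List String) = [] := by
        simp [pvTokens, PySem.Dict.getD_eq_get?_getD, PySem.Dict.get?, beq_iff_eq,
          Ne.symm h1, Ne.symm h2, Ne.symm h3, Ne.symm h4, Ne.symm h5, Ne.symm h6, Ne.symm h7,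
          Ne.symm h8, Ne.symm h9]
      simp [pvHits, hget]
    constructor
    · intro h; simp [pvNE, hhits] at h
    · intro h
      have hm := pv_firstMatch_mem l c pvTokens h
      simp only [pvTokens, List.map, List.mem_cons, List.not_mem_nil, or_false] at hm
      rcases hm with h'|h'|h'|h'|h'|h'|h'|h'|h' <;> subst h' <;> exact absurd (by decide) hc

theorem pv_resolve_iff (u l c : String) :
    pvResolvesTo u l c = true ↔ pvClassify2 u l = some c := by
  have hres : pvResolvesTo u l c = (if pvPriority.contains u then (u == c) else pvNE l c) := rfl
  rw [hres]
  simp only [pvClassify2, pv_contains_eq u, List.contains_eq_mem]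
  by_cases hcu : u ∈ pvPriority
  · simp [hcu]
  · simp only [hcu, decide_false, Bool.false_eq_true, if_false]
    exact pv_ne_iff l c

theorem pv_items_body_eq :
    (fun (items : List (String × String)) (raw_code : String) =>
      if raw_code = "" then items
      else
        let text := PySem.Str.strip raw_code
        if text = "" then items
        else items ++ [(PySem.Str.upper text, PySem.Str.lower text)])
    = (fun (items : List (String × String)) (raw_code : String) => items ++ (pvItem raw_code).toList) := by
  funext items raw_code
  by_cases h0 : raw_code = ""
  · simp [pvItem, h0]
  · simp only [pvItem, if_neg h0]
    by_cases h1 : PySem.Str.strip raw_code = "" <;> simp [h1]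

theorem pv_foldl_toList {α β : Type} (f : α → Option β) :
    ∀ (xs : List α) (acc : List β),
      xs.foldl (fun a x => a ++ (f x).toList) acc = acc ++ xs.filterMap f := by
  intro xs
  induction xs with
  | nil => simp
  | cons x xs ih => intro acc; rw [List.foldl_cons, ih]; cases hfx : f x <;> simp [hfx]

-- the nine canonical codes in Python's sorted order
def pvSortedCodes : List String :=
  ["CROSS_FIELD_CONFLICT", "EVIDENCE_MISSING", "FIELD_NOT_FOUND", "FORMAT_INVALID",
   "LOW_CONFIDENCE_CRITICAL", "OCR_AUTH_ERROR", "OCR_EMPTY_RESULT", "OCR_TIMEOUT",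
   "OCR_UNSUPPORTED_FORMAT"]

theorem pv_sorted_priority :
    PySem.List.sorted pvPriority (fun x => x) false = pvSortedCodes := by
  simp [PySem.List.sorted, PySem.List.insertBy, pvPriority, pvTokens, pvSortedCodes]
  decide

theorem pv_sorted_codes_pairwise : pvSortedCodes.Pairwise (· < ·) := by
  have h := PySem.List.sorted_ofList_pairwise_lt (xs := pvPriority)
  rw [show PySem.Set.ofList pvPriority = pvPriority from rfl, pv_sorted_priority] at h
  exact h

theorem pv_sorted_codes_nodup : pvSortedCodes.Nodup := by decide

theorem pv_mem_sorted_codes (c : String) : c ∈ pvPriority ↔ c ∈ pvSortedCodes := by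
  simp only [pvPriority, pvTokens, pvSortedCodes, List.map, List.mem_cons, List.not_mem_nil, or_false]
  tauto

-- everything after the two folds
theorem pv_final (items : List (String × String)) :
    PySem.List.sorted (PySem.List.dedup
        ((items.filterMap (fun p => pvClassify2 p.1 p.2)).filter (fun code => !(code == ""))))
      (fun x => x) false
    = (PySem.List.sorted pvPriority (fun x => x) false).filter
        (fun code => items.any (fun p => pvResolvesTo p.1 p.2 code)) := by
  rw [pv_sorted_priority]
  have hfil : (items.filterMap (fun p => pvClassify2 p.1 p.2)).filter (fun code => !(code == ""))
      = items.filterMap (fun p => pvClassify2 p.1 p.2) := by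
    apply List.filter_eq_self.mpr
    intro c hc
    rcases List.mem_filterMap.mp hc with ⟨p, _, hp⟩
    simpa using pv_classify2_ne_empty p.1 p.2 c hp
  rw [hfil]
  have hmem : ∀ c, (items.any (fun p => pvResolvesTo p.1 p.2 c) = true)
      ↔ c ∈ items.filterMap (fun p => pvClassify2 p.1 p.2) := by
    intro c
    rw [List.any_eq_true]
    constructor
    · rintro ⟨p, hp, hr⟩
      exact List.mem_filterMap.mpr ⟨p, hp, (pv_resolve_iff p.1 p.2 c).mp hr⟩
    · intro h
      rcases List.mem_filterMap.mp h with ⟨p, hp, hcc⟩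
      exact ⟨p, hp, (pv_resolve_iff p.1 p.2 c).mpr hcc⟩
  apply PySem.List.sorted_eq_of_perm_of_pairwise_lt
  · apply (List.perm_ext_iff_of_nodup
      (List.Nodup.filter _ pv_sorted_codes_nodup) (PySem.List.nodup_dedup _)).mpr
    intro a
    rw [List.mem_filter, PySem.List.mem_dedup, ← hmem a]
    constructor
    · rintro ⟨_, h2⟩; exact h2
    · intro h
      refine ⟨?_, h⟩
      rcases List.mem_filterMap.mp ((hmem a).mp h) with ⟨p, _, hp⟩
      exact (pv_mem_sorted_codes a).mp (pv_classify2_mem p.1 p.2 a hp)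
  · exact List.Pairwise.filter _ pv_sorted_codes_pairwise

-- ===== VERDICT (by name: the statement is the Claim_ definition above) =====
theorem canonicalize_reason_codes_py_spec : Claim_equal_canonicalize_reason_codes_py := by
  intro raw_codes _
  unfold Spec_canonicalize_reason_codes_py
  unfold canonicalize_reason_codes_py canonicalize_reason_codes_py_alt
  rw [funext (fun canonical => funext (fun raw_code => pv_step_eq canonical raw_code)),
    pv_items_body_eq, pv_foldl_toList, pv_foldl_toList, List.nil_append, List.nil_append,
    ← List.filterMap_filterMap]
  exact pv_final (raw_codes.filterMap pvItem)
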